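-- pv_equiv track=rewrite | github.com/ssyng162/Algorithm | 백준/실버/BOJ4659.py | have_continuous_2_same_char
-- ===== SOURCE A (Python) =====
-- def have_continuous_2_same_char(password):
--     if len(password) < 2:
--         return False
--
--     prev = ''
--
--     for p in password:
--         if p==prev:
--             if p in ('e', 'o'): continue
--             return True
--         prev = p
--     return False
-- ===== SOURCE B (Python) =====
-- def have_continuous_2_same_char(password):
--     # Two-pointer run-length encoding, then a staged check over the runs.
--     runs = []
--     i = 0
--     n = len(password)
--     while i < n:
--         j = i
--         while j < n and password[j] == password[i]:
--             j += 1
--         runs.append((password[i], j - i))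
--         i = j
--     return any(c not in ('e', 'o') and k >= 2 for c, k in runs)
-- ===== Notes on version B (the rewrite author's own statement) =====
-- stated objective: alternative
-- what changed: Replaces the rolling prev-char scan with a two-stage algorithm: a two-pointer pass run-length-encodes the password into maximal runs, then a separate check asks whether any run has length at least 2 with a non-exempt character.
import Mathlib
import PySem

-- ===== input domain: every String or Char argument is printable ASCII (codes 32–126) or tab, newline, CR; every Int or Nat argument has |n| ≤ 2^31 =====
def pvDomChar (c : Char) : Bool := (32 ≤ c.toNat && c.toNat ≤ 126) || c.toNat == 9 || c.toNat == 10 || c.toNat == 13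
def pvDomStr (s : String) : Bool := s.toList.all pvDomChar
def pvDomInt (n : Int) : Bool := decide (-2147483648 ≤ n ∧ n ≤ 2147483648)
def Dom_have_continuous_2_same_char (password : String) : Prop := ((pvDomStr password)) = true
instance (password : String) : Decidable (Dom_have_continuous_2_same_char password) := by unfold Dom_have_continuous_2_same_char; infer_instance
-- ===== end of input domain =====

-- B replaces A's rolling prev-char scan by run-length encoding followed by a check over the runs (alternative decomposition, same cost).


-- ===== PORT A =====
-- p in ('e', 'o')
def pvEO (c : Char) : Bool := c == 'e' || c == 'o'

-- A's for-loop; prev starts as '' (matches no char), modelled as none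
def pvALoop : List Char → Option Char → Bool
  | [], _ => false
  | p :: rest, prev =>
    if (some p == prev) then
      (if pvEO p then pvALoop rest prev else true)
    else pvALoop rest (some p)

def have_continuous_2_same_char (password : String) : Bool :=
  if password.toList.length < 2 then false
  else pvALoop password.toList none

-- ===== PORT B =====
-- stage 1 of Source B: the two-pointer while loop; the inner while (advance j over the
-- run at i) is transcribed as takeWhile's length, and i = j as dropWhile.
def pvRuns : List Char → List (Char × Nat)
  | [] => []
  | c :: rest =>
    (c, (rest.takeWhile (· == c)).length + 1) :: pvRuns (rest.dropWhile (· == c))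
termination_by l => l.length
decreasing_by
  simp only [List.length_cons]
  exact Nat.lt_succ_of_le (List.length_dropWhile_le _ _)

def have_continuous_2_same_char_alt (password : String) : Bool :=
  -- stage 2 of Source B: any run with char outside {'e','o'} and length >= 2
  (pvRuns password.toList).any (fun ck => !(ck.1 == 'e') && !(ck.1 == 'o') && decide (2 ≤ ck.2))

-- ===== PRECONDITION & SPEC =====
def Spec_have_continuous_2_same_char (password : String) (out : Bool) : Prop := out = have_continuous_2_same_char_alt password
instance (password : String) (out : Bool) : Decidable (Spec_have_continuous_2_same_char password out) := by unfold Spec_have_continuous_2_same_char; infer_instance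

-- ===== CLAIM =====
def Claim_equal_have_continuous_2_same_char : Prop := ∀ (password : String), Dom_have_continuous_2_same_char password → Spec_have_continuous_2_same_char password (have_continuous_2_same_char password)

-- ===== LEMMAS AND PROOFS =====
theorem pvRuns_nil : pvRuns [] = [] := by rw [pvRuns]

theorem pvRuns_cons (c : Char) (rest : List Char) :
    pvRuns (c :: rest) =
      (c, (rest.takeWhile (· == c)).length + 1) :: pvRuns (rest.dropWhile (· == c)) := by
  rw [pvRuns]

def pvRunsAny (l : List Char) : Bool :=
  (pvRuns l).any (fun ck => !(ck.1 == 'e') && !(ck.1 == 'o') && decide (2 ≤ ck.2))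

-- A's loop with prev = some c computes the run-based answer for c :: rest
theorem pvALoop_some (rest : List Char) : ∀ c, pvALoop rest (some c) = pvRunsAny (c :: rest) := by
  induction rest with
  | nil =>
    intro c
    simp [pvALoop, pvRunsAny, pvRuns_nil, pvRuns_cons]
  | cons d rest' ih =>
    intro c
    by_cases h : d = c
    · subst h
      by_cases he : pvEO d
      · have hf : (!(d == 'e') && !(d == 'o')) = false := by
          simp [pvEO] at he; rcases he with h|h <;> simp [h]
        simp only [pvALoop, he, if_true, beq_self_eq_true, Option.some.injEq, if_pos rfl]
        rw [ih d]
        simp only [pvRunsAny, pvRuns_nil, pvRuns_cons, List.takeWhile, List.dropWhile, beq_self_eq_true,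
          List.any_cons]
        simp [hf]
      · simp [pvALoop, he, pvRunsAny, pvRuns_nil, pvRuns_cons, List.takeWhile]
        simp [pvEO] at he
        simp [he.1, he.2]
    · have hne : (d == c) = false := by simp [h]
      simp only [pvALoop, Option.some.injEq, beq_iff_eq, h, if_false, ih d]
      simp only [pvRunsAny, pvRuns_nil, pvRuns_cons, List.takeWhile, List.dropWhile, hne, List.any_cons]
      simp

theorem pvALoop_none (l : List Char) : pvALoop l none = pvRunsAny l := by
  cases l with
  | nil => simp [pvALoop, pvRunsAny, pvRuns_nil, pvRuns_cons]
  | cons c rest =>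
    simp only [pvALoop]
    simpa using pvALoop_some rest c

-- ===== VERDICT =====
theorem have_continuous_2_same_char_spec : Claim_equal_have_continuous_2_same_char := by
  intro password _
  unfold Spec_have_continuous_2_same_char have_continuous_2_same_char have_continuous_2_same_char_alt
  have h := pvALoop_none password.toList
  unfold pvRunsAny at h
  split
  · next hl =>
    cases hl' : password.toList with
    | nil => simp [hl', pvRuns_nil, pvRuns_cons]
    | cons a t =>
      cases t with
      | nil => simp [hl', pvRuns_nil, pvRuns_cons, List.takeWhile]
      | cons b u => rw [hl'] at hl; simp at hl
  · exact h
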